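-- pv_equiv track=rewrite | github.com/hotbreakb/Cooking | programmers/whitehyun/기능개발.py | solution
-- ===== SOURCE A (Python) =====
-- def solution(progresses, speeds):
--     day = 1
--     answer = []
--     for i in range(len(speeds)):
--         if progresses[i] + day * speeds[i] >= 100:
--             answer[-1] += 1
--         else:
--             answer.append(1)
--             while progresses[i] + day * speeds[i] < 100:
--                 day += 1
--     return answer
-- ===== SOURCE B (Python) =====
-- def solution(progresses, speeds):
--     answer = []
--     current = 1
--     for p, s in zip(progresses, speeds):
--         d = -(-(100 - p) // s)  # integer ceil of (100 - p) / s
--         if d <= current: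
--             answer[-1] += 1
--         else:
--             answer.append(1)
--             current = d
--     return answer
-- ===== Notes on version B (the rewrite author's own statement) =====
-- stated objective: simpler
-- what changed: B replaces A's incremental day-by-day while loop (shared mutable 'day' advanced one at a time) by a closed-form integer ceiling division per task, d = -(-(100 - p) // s), followed by one grouping pass over zip(progresses, speeds).
-- outside the precondition, e.g. on solution([0, 100], [50, 0]): A returns [2], B raises ZeroDivisionError
import Mathlib
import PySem

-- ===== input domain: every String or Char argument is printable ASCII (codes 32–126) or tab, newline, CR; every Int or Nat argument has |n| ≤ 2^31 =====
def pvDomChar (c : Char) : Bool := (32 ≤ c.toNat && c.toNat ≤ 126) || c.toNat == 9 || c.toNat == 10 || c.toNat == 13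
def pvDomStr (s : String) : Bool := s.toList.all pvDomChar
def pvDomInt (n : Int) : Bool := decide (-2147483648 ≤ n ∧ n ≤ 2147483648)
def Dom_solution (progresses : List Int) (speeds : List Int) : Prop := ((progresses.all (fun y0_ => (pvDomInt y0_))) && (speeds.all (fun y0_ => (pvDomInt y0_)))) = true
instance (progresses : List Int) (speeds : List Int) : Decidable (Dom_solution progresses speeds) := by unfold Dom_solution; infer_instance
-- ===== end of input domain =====

-- B replaces A's incremental day-by-day while loop by a closed-form ceiling division per task (simpler single grouping pass).


-- ===== PORT A =====
-- answer[-1] += 1 ; on [] Python raises IndexError (excluded by Pre_), here total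
def incLastA : List Int → List Int
  | [] => []
  | [x] => [x + 1]
  | x :: xs => x :: incLastA xs

-- the while loop 'while p + day*s < 100: day += 1', made total with fuel;
-- the chosen fuel suffices exactly when 1 ≤ s (guaranteed by Pre_), where Python terminates
def whileDayA (fuel : Nat) (p s day : Int) : Int :=
  match fuel with
  | 0 => day
  | f + 1 => if p + day * s < 100 then whileDayA f p s (day + 1) else day

def stepA (progresses speeds : List Int) (st : Int × List Int) (i : Int) : Int × List Int :=
  let day := st.1
  let p := PySem.List.pyGetD progresses i 0
  let s := PySem.List.pyGetD speeds i 0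
  if p + day * s ≥ 100 then (day, incLastA st.2)
  else (whileDayA (100 - (p + day * s)).toNat p s day, st.2 ++ [1])

def solution (progresses : List Int) (speeds : List Int) : List Int :=
  ((PySem.List.pyRange 0 (speeds.length : Int) 1).foldl (stepA progresses speeds) (1, [])).2

-- ===== PORT B =====
-- answer[-1] += 1 (total form, [] excluded by Pre_)
def incLastB : List Int → List Int
  | [] => []
  | [x] => [x + 1]
  | x :: xs => x :: incLastB xs

def solution_alt (progresses : List Int) (speeds : List Int) : List Int :=
  ((progresses.zip speeds).foldl
    (fun (st : List Int × Int) (ps : Int × Int) =>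
      let d := -(PySem.Int.floordiv (-(100 - ps.1)) ps.2)
      if d ≤ st.2 then (incLastB st.1, st.2) else (st.1 ++ [1], d))
    ([], 1)).1

-- ===== PRECONDITION & SPEC =====
-- Pre_ excludes: speeds longer than progresses (A raises IndexError); a first task already
-- complete by day 1 (A's answer[-1] on [] raises IndexError); and any speed ≤ 0, on which A
-- either loops forever or, in rare interleavings, returns while B's ceiling division raises
-- ZeroDivisionError / groups differently (see cites).
def Pre_solution (progresses : List Int) (speeds : List Int) : Prop :=
  speeds.length ≤ progresses.length ∧ (∀ s ∈ speeds, 1 ≤ s) ∧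
  (speeds = [] ∨ progresses.headI + speeds.headI < 100)
instance (progresses : List Int) (speeds : List Int) : Decidable (Pre_solution progresses speeds) := by unfold Pre_solution; infer_instance
def pvWitness_solution : List Int × List Int := ([93, 30, 55], [1, 30, 5])

def Spec_solution (progresses : List Int) (speeds : List Int) (out : List Int) : Prop := out = solution_alt progresses speeds
instance (progresses : List Int) (speeds : List Int) (out : List Int) : Decidable (Spec_solution progresses speeds out) := by unfold Spec_solution; infer_instance

-- ===== CLAIM (what is proved, stated in full; the proofs are below) =====
def Claim_equal_solution : Prop := ∀ (progresses : List Int) (speeds : List Int), Dom_solution progresses speeds → Pre_solution progresses speeds → Spec_solution progresses speeds (solution progresses speeds)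

-- ===== LEMMAS AND PROOFS =====

-- structural form of A's loop (proof-only helper)
def loopA : List (Int × Int) → Int × List Int → Int × List Int
  | [], st => st
  | (p, s) :: rest, st =>
      loopA rest (if p + st.1 * s ≥ 100 then (st.1, incLastA st.2)
                  else (whileDayA (100 - (p + st.1 * s)).toNat p s st.1, st.2 ++ [1]))

lemma incLast_eq : ∀ xs, incLastA xs = incLastB xs := by
  intro xs
  induction xs with
  | nil => rfl
  | cons x xs ih =>
      cases xs with
      | nil => rfl
      | cons y ys => simp [incLastA, incLastB] at ih ⊢; exact ih

-- A's index fold equals the structural loop over the zipped lists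
lemma foldA_eq_loopA (progresses speeds : List Int) (hlen : speeds.length ≤ progresses.length) :
    ∀ (n k : Nat) (st : Int × List Int), speeds.length - k = n →
      (PySem.List.pyRange (k : Int) (speeds.length : Int) 1).foldl (stepA progresses speeds) st
        = loopA ((progresses.zip speeds).drop k) st := by
  intro n
  induction n with
  | zero =>
      intro k st hk
      have h1 : (speeds.length : Int) ≤ (k : Int) := by exact_mod_cast Nat.le_of_sub_eq_zero hk
      rw [PySem.List.pyRange_one_eq_nil h1]
      have h2 : (progresses.zip speeds).drop k = [] := by
        apply List.drop_eq_nil_of_le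
        simp [List.length_zip]; omega
      simp [h2, loopA]
  | succ n ih =>
      intro k st hk
      have hks : k < speeds.length := by omega
      have hkp : k < progresses.length := by omega
      have h1 : (k : Int) < (speeds.length : Int) := by exact_mod_cast hks
      rw [PySem.List.pyRange_one_cons h1]
      have hzip : (progresses.zip speeds).drop k
          = (progresses[k], speeds[k]) :: (progresses.zip speeds).drop (k + 1) := by
        rw [List.drop_eq_getElem_cons (by simp [List.length_zip]; omega)]
        simp [List.getElem_zip]
      rw [hzip]
      simp only [List.foldl_cons]
      have hstep : stepA progresses speeds st (k : Int)
          = (if progresses[k] + st.1 * speeds[k] ≥ 100 then (st.1, incLastA st.2)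
             else (whileDayA (100 - (progresses[k] + st.1 * speeds[k])).toNat
                     progresses[k] speeds[k] st.1, st.2 ++ [1])) := by
        simp [stepA, PySem.List.pyGetD_natCast, List.getD_eq_getElem?_getD,
              List.getElem?_eq_getElem, hks, hkp]
      rw [hstep]
      have hcast : ((k : Int) + 1) = ((k + 1 : Nat) : Int) := by push_cast; ring
      rw [hcast, ih (k + 1) _ (by omega)]
      simp [loopA]

-- closed-form ceiling: c = -((-(100 - p)) // s)
lemma ceil_bracket (p s : Int) (hs : 1 ≤ s) :
    (-(PySem.Int.floordiv (-(100 - p)) s) - 1) * s < 100 - p ∧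
      100 - p ≤ -(PySem.Int.floordiv (-(100 - p)) s) * s :=
  (PySem.Int.neg_floordiv_neg_eq_iff_of_pos (by omega)).mp rfl

lemma cond_iff_ceil (p s day : Int) (hs : 1 ≤ s) :
    p + day * s ≥ 100 ↔ -(PySem.Int.floordiv (-(100 - p)) s) ≤ day := by
  obtain ⟨h1, h2⟩ := ceil_bracket p s hs
  set c := -(PySem.Int.floordiv (-(100 - p)) s) with hc
  constructor
  · intro h
    by_contra hlt
    push_neg at hlt
    have : day ≤ c - 1 := by omega
    nlinarith
  · intro h
    nlinarith

lemma whileDayA_eq (p s : Int) (hs : 1 ≤ s) :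
    ∀ (fuel : Nat) (day : Int), day ≤ -(PySem.Int.floordiv (-(100 - p)) s) →
      -(PySem.Int.floordiv (-(100 - p)) s) - day ≤ (fuel : Int) →
      whileDayA fuel p s day = -(PySem.Int.floordiv (-(100 - p)) s) := by
  intro fuel
  set c := -(PySem.Int.floordiv (-(100 - p)) s) with hc
  induction fuel with
  | zero =>
      intro day h1 h2
      simp [whileDayA]
      omega
  | succ f ih =>
      intro day h1 h2
      simp only [whileDayA]
      by_cases h : p + day * s < 100
      · have hday : day < c := by
          by_contra hge
          push_neg at hge
          have := (cond_iff_ceil p s day hs).mpr (by omega)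
          omega
        rw [if_pos h]
        exact ih (day + 1) (by omega) (by push_cast; omega)
      · rw [if_neg h]
        have := (cond_iff_ceil p s day hs).mp (by omega)
        omega

-- fuel (100 - (p + day*s)).toNat suffices for the while loop
lemma fuel_enough (p s day : Int) (hs : 1 ≤ s) (h : p + day * s < 100) :
    -(PySem.Int.floordiv (-(100 - p)) s) - day ≤ ((100 - (p + day * s)).toNat : Int) := by
  obtain ⟨h1, h2⟩ := ceil_bracket p s hs
  set c := -(PySem.Int.floordiv (-(100 - p)) s) with hc
  have hday : day < c := by
    by_contra hge
    push_neg at hge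
    have := (cond_iff_ceil p s day hs).mpr hge
    omega
  have hcast : ((100 - (p + day * s)).toNat : Int) = 100 - (p + day * s) :=
    Int.toNat_of_nonneg (by omega)
  rw [hcast]
  nlinarith [le_mul_of_one_le_right (show (0:Int) ≤ c - day - 1 by omega) hs]

-- main invariant: A's structural loop and B's fold keep equal answers and day = current
lemma loopA_eq_foldB (l : List (Int × Int)) :
    ∀ (day : Int) (ans : List Int), (∀ ps ∈ l, 1 ≤ ps.2) →
      (loopA l (day, ans)).2
        = (l.foldl (fun (st : List Int × Int) (ps : Int × Int) =>
            let d := -(PySem.Int.floordiv (-(100 - ps.1)) ps.2)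
            if d ≤ st.2 then (incLastB st.1, st.2) else (st.1 ++ [1], d)) (ans, day)).1 := by
  induction l with
  | nil => intro day ans _; rfl
  | cons hd rest ih =>
      intro day ans hall
      obtain ⟨p, s⟩ := hd
      have hs : 1 ≤ s := hall (p, s) (by simp)
      have hrest : ∀ ps ∈ rest, 1 ≤ ps.2 := fun ps hps => hall ps (by simp [hps])
      simp only [loopA, List.foldl_cons]
      by_cases hcond : p + day * s ≥ 100
      · have hle : -(PySem.Int.floordiv (-(100 - p)) s) ≤ day :=
          (cond_iff_ceil p s day hs).mp hcond
        rw [if_pos hcond]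
        simp only [if_pos hle]
        rw [incLast_eq]
        exact ih day (incLastB ans) hrest
      · push_neg at hcond
        have hday : day < -(PySem.Int.floordiv (-(100 - p)) s) := by
          by_contra hge
          push_neg at hge
          have := (cond_iff_ceil p s day hs).mpr hge
          omega
        rw [if_neg (by omega)]
        simp only [if_neg (by omega : ¬ -(PySem.Int.floordiv (-(100 - p)) s) ≤ day)]
        rw [whileDayA_eq p s hs _ day hday.le (fuel_enough p s day hs hcond)]
        exact ih _ (ans ++ [1]) hrest

-- ===== VERDICT (by name: the statement is the Claim_ definition above) =====
theorem solution_spec : Claim_equal_solution := by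
  intro progresses speeds _ hpre
  obtain ⟨hlen, hspd, _⟩ := hpre
  show solution progresses speeds = solution_alt progresses speeds
  unfold solution solution_alt
  have h0 : ((0 : Nat) : Int) = (0 : Int) := rfl
  rw [← h0, foldA_eq_loopA progresses speeds hlen speeds.length 0 (1, []) (by omega)]
  rw [List.drop_zero]
  exact loopA_eq_foldB (progresses.zip speeds) 1 []
    (fun ps hps => hspd ps.2 (List.of_mem_zip hps).2)
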